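-- pv_equiv track=rewrite | github.com/aman99dex/huffman_deep_compression | huffman_iots_edge.py | find_patterns
-- ===== SOURCE A (Python) =====
-- def find_patterns(values, min_length=2, max_length=8):
--     """
--     Find repeating patterns in the data.
--     Returns a dictionary of patterns and their frequencies.
--     """
--     patterns = {}
--     n = len(values)
--
--     # Use sliding window to find patterns
--     for length in range(min_length, min(max_length + 1, n + 1)):
--         # Use dictionary to track pattern occurrences
--         pattern_positions = {}
--
--         # Slide window over the sequence
--         for i in range(n - length + 1):
--             pattern = tuple(values[i:i+length])
--
--             # Track positions where pattern occurs
--             if pattern in pattern_positions: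
--                 pattern_positions[pattern].append(i)
--             else:
--                 pattern_positions[pattern] = [i]
--
--         # Convert to frequency dictionary for patterns that appear more than once
--         # and have non-overlapping occurrences
--         for pattern, positions in pattern_positions.items():
--             if len(positions) > 1:
--                 # Check for non-overlapping occurrences
--                 non_overlapping = 1
--                 last_end = positions[0] + length
--
--                 for pos in positions[1:]:
--                     if pos >= last_end:
--                         non_overlapping += 1
--                         last_end = pos + length
--
--                 if non_overlapping > 1:
--                     patterns[pattern] = non_overlapping
--
--     return patterns
-- ===== SOURCE B (Python) =====
-- def find_patterns(values, min_length=2, max_length=8):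
--     """Per length: one frequency-count pass over the windows, then emit each
--     pattern at its first occurrence by a greedy forward re-scan of the sequence
--     -- no per-pattern position lists, no post-hoc scan over dict items."""
--     patterns = {}
--     n = len(values)
--     for length in range(min_length, min(max_length + 1, n + 1)):
--         counts = {}
--         for i in range(n - length + 1):
--             w = tuple(values[i:i+length])
--             counts[w] = counts.get(w, 0) + 1
--         seen = set()
--         for i in range(n - length + 1):
--             w = tuple(values[i:i+length])
--             if w in seen:
--                 continue
--             seen.add(w)
--             if counts.get(w, 0) > 1:
--                 count = 1
--                 last_end = i + length
--                 for j in range(i + 1, n - length + 1):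
--                     if tuple(values[j:j+length]) == w and j >= last_end:
--                         count += 1
--                         last_end = j + length
--                 if count > 1:
--                     patterns[w] = count
--     return patterns
-- ===== Notes on version B (the rewrite author's own statement) =====
-- stated objective: alternative
-- what changed: B drops A's per-pattern position lists and post-hoc scan over dict items: it counts window frequencies in one pass, then emits each repeated pattern at its first occurrence via a greedy forward re-scan of the sequence, using a seen-set instead of stored positions.
import Mathlib
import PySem

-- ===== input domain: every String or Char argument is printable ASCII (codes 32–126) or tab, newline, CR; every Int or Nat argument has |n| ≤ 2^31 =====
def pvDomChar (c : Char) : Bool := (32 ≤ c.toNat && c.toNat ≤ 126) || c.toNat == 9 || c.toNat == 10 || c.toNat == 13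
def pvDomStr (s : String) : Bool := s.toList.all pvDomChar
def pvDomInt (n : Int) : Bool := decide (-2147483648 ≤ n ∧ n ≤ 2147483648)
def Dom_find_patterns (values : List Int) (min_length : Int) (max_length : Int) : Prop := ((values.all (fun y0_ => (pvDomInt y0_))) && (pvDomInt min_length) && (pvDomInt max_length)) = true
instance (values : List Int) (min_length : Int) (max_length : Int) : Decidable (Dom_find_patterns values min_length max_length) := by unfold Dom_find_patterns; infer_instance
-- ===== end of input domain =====

-- B replaces A's per-pattern position lists and post-hoc scan over dict items by one
-- frequency-count pass plus a greedy forward re-scan at each pattern's first occurrence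
-- (objective: alternative — different intermediate state, same exact output).

-- ===== PORT A =====
-- inner window loop of A: record every position of each window pattern
def pvAStepWin (values : List Int) (length : Int)
    (d : PySem.Dict (List Int) (List Int)) (i : Int) : PySem.Dict (List Int) (List Int) :=
  let pattern := PySem.List.slice values (some i) (some (i + length))
  match d.get? pattern with
  | some ps => d.insert pattern (ps ++ [i])
  | none => d.insert pattern [i]

-- A's greedy scan over positions[1:] starting from positions[0]
def pvAGreedy (length : Int) (p0 : Int) (rest : List Int) : Int × Int :=
  rest.foldl (fun s pos => if pos ≥ s.2 then (s.1 + 1, pos + length) else s) (1, p0 + length)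

-- A's emission loop body over pattern_positions.items()
def pvAEmit (length : Int) (pats : PySem.Dict (List Int) Int)
    (entry : List Int × List Int) : PySem.Dict (List Int) Int :=
  if entry.2.length > 1 then
    match entry.2 with
    | [] => pats  -- unreachable: guarded by entry.2.length > 1
    | p0 :: rest =>
      let s := pvAGreedy length p0 rest
      if s.1 > 1 then pats.insert entry.1 s.1 else pats
  else pats

def pvAStepLen (values : List Int) (pats : PySem.Dict (List Int) Int) (length : Int) :
    PySem.Dict (List Int) Int :=
  let n : Int := (values.length : Int)
  let d := (PySem.List.pyRange 0 (n - length + 1)).foldl (pvAStepWin values length) PySem.Dict.empty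
  d.items.foldl (pvAEmit length) pats

def find_patterns (values : List Int) (min_length : Int) (max_length : Int) : List (List Int × Int) :=
  let n : Int := (values.length : Int)
  ((PySem.List.pyRange min_length (min (max_length + 1) (n + 1))).foldl
      (pvAStepLen values) PySem.Dict.empty).items

-- ===== PORT B =====
-- first pass: counts[w] = counts.get(w, 0) + 1 for every window w
def pvBCountStep (values : List Int) (length : Int)
    (d : PySem.Dict (List Int) Int) (i : Int) : PySem.Dict (List Int) Int :=
  let w := PySem.List.slice values (some i) (some (i + length))
  d.insert w (d.getD w 0 + 1)

-- greedy forward re-scan from first occurrence i (count, last_end as running state)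
def pvBScan (values : List Int) (length : Int) (e : Int) (w : List Int) (i : Int) : Int :=
  ((PySem.List.pyRange (i + 1) e).foldl
    (fun s j =>
      if PySem.List.slice values (some j) (some (j + length)) == w then
        if j ≥ s.2 then (s.1 + 1, j + length) else s
      else s)
    (1, i + length)).1

-- second pass: skip already-seen patterns; at a first occurrence, emit via the re-scan
def pvBEmitStep (values : List Int) (length : Int) (e : Int)
    (counts : PySem.Dict (List Int) Int)
    (st : PySem.Set (List Int) × PySem.Dict (List Int) Int) (i : Int) :
    PySem.Set (List Int) × PySem.Dict (List Int) Int :=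
  let w := PySem.List.slice values (some i) (some (i + length))
  if PySem.Set.contains st.1 w then st
  else
    let seen := PySem.Set.add st.1 w
    if counts.getD w 0 > 1 then
      let c := pvBScan values length e w i
      if c > 1 then (seen, st.2.insert w c) else (seen, st.2)
    else (seen, st.2)

def pvBStepLen (values : List Int) (pats : PySem.Dict (List Int) Int) (length : Int) :
    PySem.Dict (List Int) Int :=
  let n : Int := (values.length : Int)
  let e : Int := n - length + 1
  let counts := (PySem.List.pyRange 0 e).foldl (pvBCountStep values length) PySem.Dict.empty
  ((PySem.List.pyRange 0 e).foldl (pvBEmitStep values length e counts)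
      (PySem.Set.empty, pats)).2

def find_patterns_alt (values : List Int) (min_length : Int) (max_length : Int) : List (List Int × Int) :=
  let n : Int := (values.length : Int)
  ((PySem.List.pyRange min_length (min (max_length + 1) (n + 1))).foldl
      (pvBStepLen values) PySem.Dict.empty).items

-- ===== PRECONDITION & SPEC =====
def Spec_find_patterns (values : List Int) (min_length : Int) (max_length : Int) (out : List (List Int × Int)) : Prop := out = find_patterns_alt values min_length max_length
instance (values : List Int) (min_length : Int) (max_length : Int) (out : List (List Int × Int)) : Decidable (Spec_find_patterns values min_length max_length out) := by unfold Spec_find_patterns; infer_instance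

-- ===== CLAIM (what is proved, stated in full; the proofs are below) =====
def Claim_equal_find_patterns : Prop := ∀ (values : List Int) (min_length : Int) (max_length : Int), Dom_find_patterns values min_length max_length → Spec_find_patterns values min_length max_length (find_patterns values min_length max_length)

-- ===== LEMMAS AND PROOFS =====

-- the window starting at j (proof-side abbreviation for the slice both ports take)
def pvWin (values : List Int) (length : Int) (j : Int) : List Int :=
  PySem.List.slice values (some j) (some (j + length))

-- the elements of l that are new relative to acc, in first-occurrence order
def pvNew (acc : PySem.Set (List Int)) : List (List Int) → List (List Int)
  | [] => []
  | x :: t => if PySem.Set.contains acc x then pvNew acc t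
              else x :: pvNew (PySem.Set.add acc x) t

theorem pvSet_foldl_add_eq_append_pvNew (l : List (List Int)) :
    ∀ acc : PySem.Set (List Int), l.foldl PySem.Set.add acc = acc ++ pvNew acc l := by
  induction l with
  | nil => intro acc; simp [pvNew]
  | cons x t ih =>
      intro acc
      by_cases h : PySem.Set.contains acc x
      · have hx : x ∈ acc := by simpa [PySem.Set.contains] using h
        simp only [List.foldl_cons, pvNew, h, if_true]
        rw [show PySem.Set.add acc x = acc from by simp [PySem.Set.add, hx]]
        exact ih acc
      · have hx : x ∉ acc := by simpa [PySem.Set.contains] using h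
        simp only [List.foldl_cons, pvNew, h]
        rw [ih (PySem.Set.add acc x)]
        rw [show PySem.Set.add acc x = acc ++ [x] from by simp [PySem.Set.add, hx]]
        simp

theorem pvB_counts_getD (values : List Int) (length : Int) (ws : List Int) (p : List Int) :
    ((ws.foldl (pvBCountStep values length) PySem.Dict.empty).getD p 0)
      = ((ws.filter (fun j => pvWin values length j == p)).length : Int) := by
  have h1 : ws.foldl (pvBCountStep values length) PySem.Dict.empty
      = (ws.map (pvWin values length)).foldl
          (fun d x => d.insert x (d.getD x 0 + 1)) PySem.Dict.empty := by
    rw [List.foldl_map]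
    rfl
  rw [h1, PySem.Dict.getD_foldl_insert_add_one, PySem.Dict.getD_empty]
  rw [List.count_eq_countP, List.countP_map, ← List.countP_eq_length_filter]
  simp [Function.comp_def, pvWin]

theorem pvAStepWin_some (values : List Int) (length : Int) (i : Int)
    (d : PySem.Dict (List Int) (List Int)) (ps : List Int)
    (h : d.get? (pvWin values length i) = some ps) :
    pvAStepWin values length d i = d.insert (pvWin values length i) (ps ++ [i]) := by
  unfold pvAStepWin
  unfold pvWin at h
  simp only [h]
  rfl

theorem pvAStepWin_none (values : List Int) (length : Int) (i : Int)
    (d : PySem.Dict (List Int) (List Int))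
    (h : d.get? (pvWin values length i) = none) :
    pvAStepWin values length d i = d.insert (pvWin values length i) [i] := by
  unfold pvAStepWin
  unfold pvWin at h
  simp only [h]
  rfl

theorem pvSet_ofList_append_singleton (l : List (List Int)) (x : List Int) :
    PySem.Set.ofList (l ++ [x]) = PySem.Set.add (PySem.Set.ofList l) x := by
  show List.foldl PySem.Set.add PySem.Set.empty (l ++ [x]) = _
  rw [List.foldl_append]
  rfl

theorem pvSet_add_of_mem {s : PySem.Set (List Int)} {x : List Int} (h : x ∈ s) :
    PySem.Set.add s x = s := by
  simp [PySem.Set.add, PySem.Set.contains, h]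

theorem pvSet_add_of_not_mem {s : PySem.Set (List Int)} {x : List Int} (h : x ∉ s) :
    PySem.Set.add s x = s ++ [x] := by
  simp [PySem.Set.add, PySem.Set.contains, h]

theorem pvA_dict_items (values : List Int) (length : Int) (ws : List Int) :
    (ws.foldl (pvAStepWin values length) PySem.Dict.empty).items
      = (PySem.Set.ofList (ws.map (pvWin values length))).map
          (fun p => (p, ws.filter (fun j => pvWin values length j == p))) := by
  induction ws using List.reverseRecOn with
  | nil => rfl
  | append_singleton ws i ih =>
      rw [List.foldl_append, List.foldl_cons, List.foldl_nil]
      have hkeys : (ws.foldl (pvAStepWin values length) PySem.Dict.empty).keys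
          = PySem.Set.ofList (ws.map (pvWin values length)) := by
        show (ws.foldl (pvAStepWin values length) PySem.Dict.empty).items.map (·.1) = _
        rw [ih, List.map_map]
        exact List.map_id' _
      have hnodup : (ws.foldl (pvAStepWin values length) PySem.Dict.empty).keys.Nodup := by
        rw [hkeys]; exact PySem.Set.nodup_ofList _
      have hmapappend : (ws ++ [i]).map (pvWin values length)
          = ws.map (pvWin values length) ++ [pvWin values length i] := by simp
      by_cases hmem : pvWin values length i ∈ ws.map (pvWin values length)
      · -- pattern already present: insert overwrites in place
        have hitem : (pvWin values length i,
            ws.filter (fun j => pvWin values length j == pvWin values length i))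
            ∈ (ws.foldl (pvAStepWin values length) PySem.Dict.empty).items := by
          rw [ih]
          exact List.mem_map.mpr ⟨_, (PySem.Set.mem_ofList _ _).mpr hmem, rfl⟩
        have hget := PySem.Dict.get?_of_mem_items _ hitem hnodup
        have hcont : (ws.foldl (pvAStepWin values length) PySem.Dict.empty).contains
            (pvWin values length i) = true := by
          rw [PySem.Dict.contains_eq_isSome_get?, hget]; rfl
        have hstep := pvAStepWin_some values length i
          (ws.foldl (pvAStepWin values length) PySem.Dict.empty) _ hget
        have hofl : PySem.Set.ofList ((ws ++ [i]).map (pvWin values length))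
            = PySem.Set.ofList (ws.map (pvWin values length)) := by
          rw [hmapappend, pvSet_ofList_append_singleton]
          exact pvSet_add_of_mem ((PySem.Set.mem_ofList _ _).mpr hmem)
        rw [hstep, PySem.Dict.items_insert_of_contains _ _ hcont, ih, List.map_map, hofl]
        refine List.map_congr_left ?_
        intro p hp
        simp only [Function.comp_apply]
        by_cases hpk : p = pvWin values length i
        · subst hpk
          simp only [beq_self_eq_true, if_true]
          rw [List.filter_append]
          simp
        · rw [if_neg (by simp [hpk])]
          rw [List.filter_append]
          have hf : (pvWin values length i == p) = false :=
            beq_false_of_ne (fun h => hpk h.symm)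
          simp [hf]
      · -- fresh pattern: insert appends
        have hget : (ws.foldl (pvAStepWin values length) PySem.Dict.empty).get?
            (pvWin values length i) = none := by
          rw [PySem.Dict.get?_eq_none_iff_not_mem_keys, hkeys, PySem.Set.mem_ofList]
          exact hmem
        have hcont : (ws.foldl (pvAStepWin values length) PySem.Dict.empty).contains
            (pvWin values length i) = false := by
          rw [PySem.Dict.contains_eq_isSome_get?, hget]; rfl
        have hstep := pvAStepWin_none values length i
          (ws.foldl (pvAStepWin values length) PySem.Dict.empty) hget
        have hofl : PySem.Set.ofList ((ws ++ [i]).map (pvWin values length))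
            = PySem.Set.ofList (ws.map (pvWin values length)) ++ [pvWin values length i] := by
          rw [hmapappend, pvSet_ofList_append_singleton]
          exact pvSet_add_of_not_mem (fun h => hmem ((PySem.Set.mem_ofList _ _).mp h))
        rw [hstep, PySem.Dict.items_insert_of_not_contains _ _ hcont, ih, hofl, List.map_append]
        congr 1
        · refine List.map_congr_left ?_
          intro p hp
          have hpmem : p ∈ ws.map (pvWin values length) := (PySem.Set.mem_ofList _ _).mp hp
          have hf : (pvWin values length i == p) = false :=
            beq_false_of_ne (fun h => hmem (h ▸ hpmem))
          rw [List.filter_append]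
          simp [hf]
        · have hfil : ws.filter (fun j => pvWin values length j == pvWin values length i) = [] := by
            rw [List.filter_eq_nil_iff]
            intro j hj hbeq
            exact hmem (List.mem_map.mpr ⟨j, hj, eq_of_beq hbeq⟩)
          simp [List.filter_append, hfil]

theorem pvBScan_eq_pvAGreedy (values : List Int) (length : Int) (e : Int) (w : List Int) (i : Int) :
    pvBScan values length e w i
      = (pvAGreedy length i
          ((PySem.List.pyRange (i + 1) e).filter (fun j => pvWin values length j == w))).1 := by
  unfold pvBScan pvAGreedy
  rw [List.foldl_filter]
  rfl

theorem pvBEmitStep_seen (values : List Int) (length e : Int)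
    (counts : PySem.Dict (List Int) Int) (st : PySem.Set (List Int) × PySem.Dict (List Int) Int)
    (i : Int) (h : PySem.Set.contains st.1 (pvWin values length i) = true) :
    pvBEmitStep values length e counts st i = st := by
  unfold pvBEmitStep
  unfold pvWin at h
  simp only [h]
  rfl

theorem pvBEmitStep_new (values : List Int) (length e : Int)
    (counts : PySem.Dict (List Int) Int) (st : PySem.Set (List Int) × PySem.Dict (List Int) Int)
    (i : Int) (h : PySem.Set.contains st.1 (pvWin values length i) = false) :
    pvBEmitStep values length e counts st i =
      (if counts.getD (pvWin values length i) 0 > 1 then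
        (if pvBScan values length e (pvWin values length i) i > 1
          then (PySem.Set.add st.1 (pvWin values length i),
                st.2.insert (pvWin values length i) (pvBScan values length e (pvWin values length i) i))
          else (PySem.Set.add st.1 (pvWin values length i), st.2))
      else (PySem.Set.add st.1 (pvWin values length i), st.2)) := by
  unfold pvBEmitStep
  unfold pvWin at h ⊢
  simp only [h]
  rfl

theorem pvSet_contains_of_mem {s : PySem.Set (List Int)} {x : List Int} (h : x ∈ s) :
    PySem.Set.contains s x = true := by simp [PySem.Set.contains, h]
theorem pvSet_contains_of_not_mem {s : PySem.Set (List Int)} {x : List Int} (h : x ∉ s) :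
    PySem.Set.contains s x = false := by simp [PySem.Set.contains, h]

theorem pvB_emit_loop (values : List Int) (length e : Int)
    (counts : PySem.Dict (List Int) Int)
    (hc : ∀ p, counts.getD p 0
      = (((PySem.List.pyRange 0 e).filter (fun j => pvWin values length j == p)).length : Int))
    (F : PySem.Dict (List Int) Int → List Int → PySem.Dict (List Int) Int)
    (hF : ∀ pats p, F pats p = pvAEmit length pats
      (p, (PySem.List.pyRange 0 e).filter (fun j => pvWin values length j == p)))
    (fuel : Nat) :
    ∀ a : Int, 0 ≤ a → (e - a).toNat = fuel →
    ∀ pats : PySem.Dict (List Int) Int,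
    ((PySem.List.pyRange a e).foldl (pvBEmitStep values length e counts)
        (PySem.Set.ofList ((PySem.List.pyRange 0 a).map (pvWin values length)), pats)).2
      = (pvNew (PySem.Set.ofList ((PySem.List.pyRange 0 a).map (pvWin values length)))
            ((PySem.List.pyRange a e).map (pvWin values length))).foldl F pats := by
  induction fuel with
  | zero =>
      intro a ha hfa pats
      have he : e ≤ a := by omega
      rw [PySem.List.pyRange_one_eq_nil he]
      rfl
  | succ fuel ih =>
      intro a ha hfa pats
      have hlt : a < e := by omega
      have hseen : PySem.Set.ofList ((PySem.List.pyRange 0 (a + 1)).map (pvWin values length))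
          = PySem.Set.add (PySem.Set.ofList ((PySem.List.pyRange 0 a).map (pvWin values length)))
              (pvWin values length a) := by
        rw [PySem.List.pyRange_one_succ_right ha, List.map_append, List.map_cons, List.map_nil,
            pvSet_ofList_append_singleton]
      rw [PySem.List.pyRange_one_cons hlt, List.foldl_cons, List.map_cons]
      by_cases hmem : pvWin values length a
          ∈ ((PySem.List.pyRange 0 a).map (pvWin values length) : List (List Int))
      · have hmem' : pvWin values length a
            ∈ PySem.Set.ofList ((PySem.List.pyRange 0 a).map (pvWin values length)) :=
          (PySem.Set.mem_ofList _ _).mpr hmem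
        have hcont := pvSet_contains_of_mem hmem'
        rw [pvBEmitStep_seen values length e counts _ a hcont]
        have hnewskip : pvNew (PySem.Set.ofList ((PySem.List.pyRange 0 a).map (pvWin values length)))
            (pvWin values length a :: (PySem.List.pyRange (a + 1) e).map (pvWin values length))
            = pvNew (PySem.Set.ofList ((PySem.List.pyRange 0 a).map (pvWin values length)))
                ((PySem.List.pyRange (a + 1) e).map (pvWin values length)) := by
          simp only [pvNew, hcont, if_true]
        rw [hnewskip]
        have := ih (a + 1) (by omega) (by omega) pats
        rw [hseen, pvSet_add_of_mem hmem'] at this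
        exact this
      · have hmem' : pvWin values length a
            ∉ PySem.Set.ofList ((PySem.List.pyRange 0 a).map (pvWin values length)) :=
          fun h => hmem ((PySem.Set.mem_ofList _ _).mp h)
        have hcont := pvSet_contains_of_not_mem hmem'
        rw [pvBEmitStep_new values length e counts _ a hcont]
        have hnewcons : pvNew (PySem.Set.ofList ((PySem.List.pyRange 0 a).map (pvWin values length)))
            (pvWin values length a :: (PySem.List.pyRange (a + 1) e).map (pvWin values length))
            = pvWin values length a ::
                pvNew (PySem.Set.add (PySem.Set.ofList ((PySem.List.pyRange 0 a).map (pvWin values length)))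
                    (pvWin values length a))
                  ((PySem.List.pyRange (a + 1) e).map (pvWin values length)) := by
          simp only [pvNew, hcont, Bool.false_eq_true, if_false]
        rw [hnewcons, List.foldl_cons, hF]
        -- positions of the new pattern over the full range
        have hpos : (PySem.List.pyRange 0 e).filter
              (fun j => pvWin values length j == pvWin values length a)
            = a :: (PySem.List.pyRange (a + 1) e).filter
                (fun j => pvWin values length j == pvWin values length a) := by
          rw [PySem.List.pyRange_one_append 0 a e ha (le_of_lt hlt), List.filter_append]
          have hpre : (PySem.List.pyRange 0 a).filter
              (fun j => pvWin values length j == pvWin values length a) = [] := by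
            rw [List.filter_eq_nil_iff]
            intro j hj hbeq
            exact hmem (List.mem_map.mpr ⟨j, hj, (eq_of_beq hbeq)⟩)
          rw [hpre, PySem.List.pyRange_one_cons hlt, List.filter_cons]
          simp
        have hcnt := hc (pvWin values length a)
        rw [hpos] at hcnt
        have hscan := pvBScan_eq_pvAGreedy values length e (pvWin values length a) a
        -- the B step's second component is exactly A's emission for this entry
        have hstep2 : (if counts.getD (pvWin values length a) 0 > 1 then
              (if pvBScan values length e (pvWin values length a) a > 1
                then (PySem.Set.add (PySem.Set.ofList ((PySem.List.pyRange 0 a).map (pvWin values length)))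
                        (pvWin values length a),
                      pats.insert (pvWin values length a)
                        (pvBScan values length e (pvWin values length a) a))
                else (PySem.Set.add (PySem.Set.ofList ((PySem.List.pyRange 0 a).map (pvWin values length)))
                        (pvWin values length a), pats))
            else (PySem.Set.add (PySem.Set.ofList ((PySem.List.pyRange 0 a).map (pvWin values length)))
                    (pvWin values length a), pats))
            = (PySem.Set.add (PySem.Set.ofList ((PySem.List.pyRange 0 a).map (pvWin values length)))
                  (pvWin values length a),
               pvAEmit length pats (pvWin values length a,
                 (PySem.List.pyRange 0 e).filter
                   (fun j => pvWin values length j == pvWin values length a))) := by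
          rw [hpos]
          by_cases hrf : ((PySem.List.pyRange (a + 1) e).filter
              (fun j => pvWin values length j == pvWin values length a)) = []
          · rw [hrf] at hcnt ⊢
            rw [hcnt]
            norm_num
            simp [pvAEmit]
          · have hlen : 0 < ((PySem.List.pyRange (a + 1) e).filter
                (fun j => pvWin values length j == pvWin values length a)).length :=
              List.length_pos_iff.mpr hrf
            rw [hcnt]
            rw [if_pos (by simp only [List.length_cons]; push_cast; omega)]
            rw [hscan]
            have hA : pvAEmit length pats (pvWin values length a,
                a :: (PySem.List.pyRange (a + 1) e).filter
                  (fun j => pvWin values length j == pvWin values length a))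
                = (if (pvAGreedy length a ((PySem.List.pyRange (a + 1) e).filter
                      (fun j => pvWin values length j == pvWin values length a))).1 > 1
                   then pats.insert (pvWin values length a)
                      (pvAGreedy length a ((PySem.List.pyRange (a + 1) e).filter
                        (fun j => pvWin values length j == pvWin values length a))).1
                   else pats) := by
              unfold pvAEmit
              rw [if_pos (by simp only [List.length_cons]; omega)]
            rw [hA]
            split_ifs with hgt
            · rfl
            · rfl
        rw [hstep2]
        have := ih (a + 1) (by omega) (by omega)
          (pvAEmit length pats (pvWin values length a,
            (PySem.List.pyRange 0 e).filter
              (fun j => pvWin values length j == pvWin values length a)))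
        rw [hseen] at this
        exact this

theorem pvNew_empty (l : List (List Int)) :
    pvNew PySem.Set.empty l = PySem.Set.ofList l := by
  rw [show PySem.Set.ofList l = l.foldl PySem.Set.add PySem.Set.empty from rfl,
      pvSet_foldl_add_eq_append_pvNew]
  rfl

theorem pv_step_len_eq (values : List Int) (length : Int) (pats : PySem.Dict (List Int) Int) :
    pvAStepLen values pats length = pvBStepLen values pats length := by
  show ((PySem.List.pyRange 0 ((values.length : Int) - length + 1)).foldl
          (pvAStepWin values length) PySem.Dict.empty).items.foldl (pvAEmit length) pats
      = ((PySem.List.pyRange 0 ((values.length : Int) - length + 1)).foldl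
          (pvBEmitStep values length ((values.length : Int) - length + 1)
            ((PySem.List.pyRange 0 ((values.length : Int) - length + 1)).foldl
              (pvBCountStep values length) PySem.Dict.empty))
          (PySem.Set.empty, pats)).2
  rw [pvA_dict_items, List.foldl_map]
  have hloop := pvB_emit_loop values length ((values.length : Int) - length + 1)
    ((PySem.List.pyRange 0 ((values.length : Int) - length + 1)).foldl
      (pvBCountStep values length) PySem.Dict.empty)
    (fun p => pvB_counts_getD values length (PySem.List.pyRange 0 ((values.length : Int) - length + 1)) p)
    (fun pats p => pvAEmit length pats
      (p, (PySem.List.pyRange 0 ((values.length : Int) - length + 1)).filter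
            (fun j => pvWin values length j == p)))
    (fun _ _ => rfl)
    (((values.length : Int) - length + 1 - 0).toNat) 0 (le_refl 0) rfl pats
  rw [PySem.List.pyRange_one_eq_nil (le_refl (0 : Int))] at hloop
  simp only [List.map_nil] at hloop
  rw [show PySem.Set.ofList ([] : List (List Int)) = PySem.Set.empty from rfl, pvNew_empty] at hloop
  exact hloop.symm

-- ===== VERDICT (by name: the statement is the Claim_ definition above) =====
theorem find_patterns_spec : Claim_equal_find_patterns := by
  intro values min_length max_length _
  unfold Spec_find_patterns find_patterns find_patterns_alt
  exact congrArg PySem.Dict.items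
    (PySem.List.foldl_congr_mem _ _ _ _ (fun acc x _ => pv_step_len_eq values x acc))
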